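-- pv_equiv track=rewrite | github.com/Anqeliccom/Algorithms | 31.py | check_recursive_calls
-- ===== SOURCE A (Python) =====
-- def check_recursive_calls(components, graph):
--     def dfs_rec_check(node, visited_nodes, component):
--         visited_nodes.add(node)
--         for neighbor in graph.get(node, []):
--             if neighbor in component:
--                 recursive_calls[node] = True
--                 break
--             if neighbor not in visited_nodes:
--                 dfs_rec_check(neighbor, visited_nodes, component)
--
--     recursive_calls = {}
--     for component in components:
--         visited_nodes = set()
--         for node in component:
--             if node not in visited_nodes:
--                 dfs_rec_check(node, visited_nodes, component)
--             if node not in recursive_calls: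
--                 recursive_calls[node] = False
--     return recursive_calls
-- ===== SOURCE B (Python) =====
-- def check_recursive_calls(components, graph):
--     recursive_calls = {}
--     for component in components:
--         visited = set()
--         for start in component:
--             if start not in visited:
--                 # iterative DFS with an explicit stack of (node, remaining-neighbors) frames
--                 visited.add(start)
--                 stack = [(start, list(graph.get(start, [])))]
--                 while stack:
--                     node, rest = stack.pop()
--                     if rest:
--                         nb = rest[0]
--                         if nb in component:
--                             recursive_calls[node] = True  # drop frame: the 'break'
--                         else:
--                             stack.append((node, rest[1:]))
--                             if nb not in visited:
--                                 visited.add(nb)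
--                                 stack.append((nb, list(graph.get(nb, []))))
--             if start not in recursive_calls:
--                 recursive_calls[start] = False
--     return recursive_calls
-- ===== Notes on version B (the rewrite author's own statement) =====
-- stated objective: alternative
-- what changed: The nested recursive DFS (closure mutating outer state) is replaced by an iterative small-step machine: an explicit stack of (node, remaining-neighbors) frames whose pop loop performs the same pruned traversal without recursion, so it cannot hit Python's recursion limit.
import Mathlib
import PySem

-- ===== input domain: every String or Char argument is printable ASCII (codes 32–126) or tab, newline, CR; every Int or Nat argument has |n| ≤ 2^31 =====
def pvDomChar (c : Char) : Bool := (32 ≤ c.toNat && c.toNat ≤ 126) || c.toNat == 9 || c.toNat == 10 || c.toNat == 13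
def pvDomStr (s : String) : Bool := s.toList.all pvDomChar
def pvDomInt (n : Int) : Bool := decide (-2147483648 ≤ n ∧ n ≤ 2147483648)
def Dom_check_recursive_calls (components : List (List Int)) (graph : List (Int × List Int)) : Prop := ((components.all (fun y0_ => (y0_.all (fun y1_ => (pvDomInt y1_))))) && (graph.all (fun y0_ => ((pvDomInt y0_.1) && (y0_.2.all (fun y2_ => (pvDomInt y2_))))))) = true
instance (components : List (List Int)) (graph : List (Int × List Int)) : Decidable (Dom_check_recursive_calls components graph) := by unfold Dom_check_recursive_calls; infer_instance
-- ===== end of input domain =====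

-- B replaces A's nested recursive DFS by an explicit (node, remaining-neighbors) frame stack
-- performing the identical pruned traversal iteratively (objective: alternative decomposition).

-- shared primitive: Python's graph.get(node, [])
def pvAdj (graph : List (Int × List Int)) (n : Int) : List Int :=
  PySem.Dict.getD (PySem.Dict.mk graph) n []

-- every node any run can ever touch (used only to size the totality fuel of both ports)
def pvAllNodes (components : List (List Int)) (graph : List (Int × List Int)) : List Int :=
  graph.map (·.1) ++ (graph.map (·.2)).flatten ++ components.flatten

-- ===== PORT A =====
mutual
-- dfs_rec_check: visited.add(node); then the for-loop over graph.get(node, [])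
def pvDfsA (graph : List (Int × List Int)) (component : List Int) :
    Nat → Int → PySem.Set Int → PySem.Dict Int Bool → PySem.Set Int × PySem.Dict Int Bool
  | 0, _, v, c => (v, c)          -- fuel guard (never reached with the fuel the driver supplies)
  | f + 1, n, v, c => pvLoopA graph component f n (pvAdj graph n) (PySem.Set.add v n) c
  termination_by f _ _ _ => (f, 0)

-- the for-loop body of dfs_rec_check
def pvLoopA (graph : List (Int × List Int)) (component : List Int) :
    Nat → Int → List Int → PySem.Set Int → PySem.Dict Int Bool → PySem.Set Int × PySem.Dict Int Bool
  | _, _, [], v, c => (v, c)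
  | f, n, nb :: r, v, c =>
    if nb ∈ component then (v, PySem.Dict.insert c n true)       -- mark & break
    else if PySem.Set.contains v nb then pvLoopA graph component f n r v c
    else
      let p := pvDfsA graph component f nb v c
      pvLoopA graph component f n r p.1 p.2
  termination_by f _ l _ _ => (f, l.length + 1)
end

def check_recursive_calls (components : List (List Int)) (graph : List (Int × List Int)) : List (Int × Bool) :=
  let fuel := (pvAllNodes components graph).length + 2
  (components.foldl
    (fun (calls : PySem.Dict Int Bool) component =>
      (component.foldl
        (fun (st : PySem.Set Int × PySem.Dict Int Bool) node =>
          let st := if PySem.Set.contains st.1 node then st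
                    else pvDfsA graph component fuel node st.1 st.2
          if PySem.Dict.contains st.2 node then st
          else (st.1, PySem.Dict.insert st.2 node false))
        (PySem.Set.empty, calls)).2)
    PySem.Dict.empty).items

-- ===== PORT B =====
-- the while-loop over the explicit stack; one recursive call = one while iteration
def pvMachB (graph : List (Int × List Int)) (component : List Int) :
    Nat → List (Int × List Int) → PySem.Set Int → PySem.Dict Int Bool → PySem.Set Int × PySem.Dict Int Bool
  | 0, _, v, c => (v, c)          -- fuel guard (never reached with the fuel the driver supplies)
  | _ + 1, [], v, c => (v, c)
  | f + 1, (_, []) :: st, v, c => pvMachB graph component f st v c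
  | f + 1, (n, nb :: r) :: st, v, c =>
    if nb ∈ component then pvMachB graph component f st v (PySem.Dict.insert c n true)
    else if PySem.Set.contains v nb then pvMachB graph component f ((n, r) :: st) v c
    else pvMachB graph component f ((nb, pvAdj graph nb) :: (n, r) :: st) (PySem.Set.add v nb) c

def check_recursive_calls_alt (components : List (List Int)) (graph : List (Int × List Int)) : List (Int × Bool) :=
  let len := (pvAllNodes components graph).length
  let deg := ((graph.map (·.2)).flatten).length
  let fuel := (len + deg + 2) * (len + deg + 2)
  (components.foldl
    (fun (calls : PySem.Dict Int Bool) component =>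
      (component.foldl
        (fun (st : PySem.Set Int × PySem.Dict Int Bool) node =>
          let st := if PySem.Set.contains st.1 node then st
                    else pvMachB graph component fuel [(node, pvAdj graph node)] (PySem.Set.add st.1 node) st.2
          if PySem.Dict.contains st.2 node then st
          else (st.1, PySem.Dict.insert st.2 node false))
        (PySem.Set.empty, calls)).2)
    PySem.Dict.empty).items

-- ===== PRECONDITION & SPEC =====
def Spec_check_recursive_calls (components : List (List Int)) (graph : List (Int × List Int)) (out : List (Int × Bool)) : Prop := out = check_recursive_calls_alt components graph
instance (components : List (List Int)) (graph : List (Int × List Int)) (out : List (Int × Bool)) : Decidable (Spec_check_recursive_calls components graph out) := by unfold Spec_check_recursive_calls; infer_instance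

-- ===== CLAIM (what is proved, stated in full; the proofs are below) =====
def Claim_equal_check_recursive_calls : Prop := ∀ (components : List (List Int)) (graph : List (Int × List Int)), Dom_check_recursive_calls components graph → Spec_check_recursive_calls components graph (check_recursive_calls components graph)

-- ===== LEMMAS AND PROOFS =====

-- graph.get(n, []) on a cons cell
theorem pvAdj_cons (k : Int) (l : List Int) (g : List (Int × List Int)) (n : Int) :
    pvAdj ((k, l) :: g) n = if k = n then l else pvAdj g n := by
  simp [pvAdj, PySem.Dict.getD_eq_get?_getD, PySem.Dict.get?_mk_cons]
  split <;> simp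

theorem pvAdj_nil (n : Int) : pvAdj [] n = [] := by
  have : PySem.Dict.mk ([] : List (Int × List Int)) = PySem.Dict.empty := rfl
  simp [pvAdj, this, PySem.Dict.getD_eq_get?_getD, PySem.Dict.get?_empty]

theorem pvAdj_sub (graph : List (Int × List Int)) (n x : Int)
    (hx : x ∈ pvAdj graph n) : x ∈ (graph.map (·.2)).flatten := by
  induction graph with
  | nil => rw [pvAdj_nil] at hx; cases hx
  | cons p g ih =>
    rw [show p = (p.1, p.2) from rfl, pvAdj_cons] at hx
    simp only [List.map_cons, List.flatten_cons, List.mem_append]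
    split at hx
    · exact Or.inl hx
    · exact Or.inr (ih hx)

theorem pvAdj_len (graph : List (Int × List Int)) (n : Int) :
    (pvAdj graph n).length ≤ ((graph.map (·.2)).flatten).length := by
  induction graph with
  | nil => rw [pvAdj_nil]; simp
  | cons p g ih =>
    rw [show p = (p.1, p.2) from rfl, pvAdj_cons]
    simp only [List.map_cons, List.flatten_cons, List.length_append]
    split <;> omega

-- the not-yet-visited part of the node universe U
def pvUnvis (U : Finset Int) (v : PySem.Set Int) : Finset Int := U.filter (fun x => x ∉ v)

theorem pvUnvis_card_le (U : Finset Int) (v : PySem.Set Int) : (pvUnvis U v).card ≤ U.card :=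
  Finset.card_le_card (Finset.filter_subset _ _)

theorem pvUnvis_add (U : Finset Int) (v : PySem.Set Int) (nb : Int) (_h2 : nb ∉ v) :
    pvUnvis U (PySem.Set.add v nb) = (pvUnvis U v).erase nb := by
  ext x
  simp only [pvUnvis, Finset.mem_erase, Finset.mem_filter, PySem.Set.mem_add]
  tauto

theorem pvUnvis_card_add (U : Finset Int) (v : PySem.Set Int) (nb : Int) (h1 : nb ∈ U) (h2 : nb ∉ v) :
    (pvUnvis U (PySem.Set.add v nb)).card = (pvUnvis U v).card - 1 := by
  rw [pvUnvis_add U v nb h2]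
  exact Finset.card_erase_of_mem (by simp [pvUnvis, h1, h2])

theorem pvUnvis_mem (U : Finset Int) (v : PySem.Set Int) (nb : Int) (h1 : nb ∈ U) (h2 : nb ∉ v) :
    nb ∈ pvUnvis U v := by simp [pvUnvis, h1, h2]

theorem pvUnvis_card_mono (U : Finset Int) (v w : PySem.Set Int) (h : ∀ x ∈ v, x ∈ w) :
    (pvUnvis U w).card ≤ (pvUnvis U v).card := by
  apply Finset.card_le_card
  intro x hx
  simp only [pvUnvis, Finset.mem_filter] at *
  exact ⟨hx.1, fun hv => hx.2 (h x hv)⟩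

-- big-step semantics of the pruned DFS loop shared by both ports,
-- indexed by the number of machine iterations it costs
inductive PvLoop (graph : List (Int × List Int)) (component : List Int) :
    Nat → Int → List Int → PySem.Set Int → PySem.Dict Int Bool →
    PySem.Set Int → PySem.Dict Int Bool → Prop where
  | nil (n : Int) (v : PySem.Set Int) (c : PySem.Dict Int Bool) :
      PvLoop graph component 1 n [] v c v c
  | hit {nb : Int} (n : Int) (r : List Int) (v : PySem.Set Int) (c : PySem.Dict Int Bool)
      (h : nb ∈ component) :
      PvLoop graph component 1 n (nb :: r) v c v (PySem.Dict.insert c n true)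
  | skip {k : Nat} {nb : Int} {r : List Int} {v : PySem.Set Int} {c : PySem.Dict Int Bool}
      {v' : PySem.Set Int} {c' : PySem.Dict Int Bool} (n : Int)
      (h1 : nb ∉ component) (h2 : nb ∈ v)
      (hr : PvLoop graph component k n r v c v' c') :
      PvLoop graph component (k + 1) n (nb :: r) v c v' c'
  | step {k1 k2 : Nat} {nb : Int} {r : List Int} {v : PySem.Set Int} {c : PySem.Dict Int Bool}
      {v1 : PySem.Set Int} {c1 : PySem.Dict Int Bool} {v' : PySem.Set Int} {c' : PySem.Dict Int Bool}
      (n : Int) (h1 : nb ∉ component) (h2 : nb ∉ v)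
      (hd : PvLoop graph component k1 nb (pvAdj graph nb) (PySem.Set.add v nb) c v1 c1)
      (hr : PvLoop graph component k2 n r v1 c1 v' c') :
      PvLoop graph component (k1 + k2 + 1) n (nb :: r) v c v' c'

theorem pvLoop_mono {graph : List (Int × List Int)} {component : List Int}
    {k : Nat} {n : Int} {nbrs : List Int} {v : PySem.Set Int} {c : PySem.Dict Int Bool}
    {v' : PySem.Set Int} {c' : PySem.Dict Int Bool}
    (h : PvLoop graph component k n nbrs v c v' c') : ∀ x ∈ v, x ∈ v' := by
  induction h with
  | nil => exact fun x hx => hx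
  | hit => exact fun x hx => hx
  | skip n h1 h2 hr ih => exact ih
  | step n h1 h2 hd hr ih1 ih2 =>
    exact fun x hx => ih2 x (ih1 x ((PySem.Set.mem_add _ _ _).2 (Or.inl hx)))

theorem pvLoop_subU {graph : List (Int × List Int)} {component : List Int} {U : Finset Int}
    (hg : ∀ m x, x ∈ pvAdj graph m → x ∈ U)
    {k : Nat} {n : Int} {nbrs : List Int} {v : PySem.Set Int} {c : PySem.Dict Int Bool}
    {v' : PySem.Set Int} {c' : PySem.Dict Int Bool}
    (h : PvLoop graph component k n nbrs v c v' c')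
    (hn : ∀ x ∈ nbrs, x ∈ U) : ∀ x ∈ v', x ∈ v ∨ x ∈ U := by
  induction h with
  | nil => exact fun x hx => Or.inl hx
  | hit => exact fun x hx => Or.inl hx
  | skip n h1 h2 hr ih =>
    exact ih (fun x hx => hn x (List.mem_cons_of_mem _ hx))
  | step n h1 h2 hd hr ih1 ih2 =>
    intro x hx
    rcases ih2 (fun y hy => hn y (List.mem_cons_of_mem _ hy)) x hx with h | h
    · rcases ih1 (fun y hy => hg _ y hy) x h with h' | h'
      · rcases (PySem.Set.mem_add _ _ _).1 h' with h'' | h''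
        · exact Or.inl h''
        · exact Or.inr (h'' ▸ hn _ (List.mem_cons_self))
      · exact Or.inr h'
    · exact Or.inr h

-- A-adequacy: with enough fuel, pvLoopA computes a PvLoop big step
theorem pvLoopA_adequate {graph : List (Int × List Int)} {component : List Int} {U : Finset Int}
    (hg : ∀ m x, x ∈ pvAdj graph m → x ∈ U) :
    ∀ (f : Nat) (n : Int) (nbrs : List Int) (v : PySem.Set Int) (c : PySem.Dict Int Bool),
      (∀ x ∈ nbrs, x ∈ U) → (pvUnvis U v).card < f →
      ∃ k, PvLoop graph component k n nbrs v c
        (pvLoopA graph component f n nbrs v c).1 (pvLoopA graph component f n nbrs v c).2 := by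
  intro f
  induction f using Nat.strong_induction_on with
  | _ f ihf =>
    intro n nbrs
    induction nbrs with
    | nil =>
      intro v c hn hcard
      exact ⟨1, by simpa [pvLoopA] using PvLoop.nil n v c⟩
    | cons nb r ihr =>
      intro v c hn hcard
      by_cases hc : nb ∈ component
      · exact ⟨1, by simpa [pvLoopA, hc] using PvLoop.hit n r v c hc⟩
      · by_cases hv : nb ∈ v
        · obtain ⟨k, hk⟩ := ihr v c (fun x hx => hn x (List.mem_cons_of_mem _ hx)) hcard
          refine ⟨k + 1, ?_⟩
          have hvb : PySem.Set.contains v nb = true := (PySem.Set.contains_iff v nb).2 hv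
          have heq : pvLoopA graph component f n (nb :: r) v c = pvLoopA graph component f n r v c := by
            cases f <;> simp [pvLoopA, hc, hv]
          rw [heq]
          exact PvLoop.skip n hc hv hk
        · -- recursive dfs call
          have hnbU : nb ∈ U := hn nb List.mem_cons_self
          have hpos : 1 ≤ (pvUnvis U v).card :=
            Finset.card_pos.2 ⟨nb, pvUnvis_mem U v nb hnbU hv⟩
          obtain ⟨g, rfl⟩ : ∃ g, f = g + 1 := ⟨f - 1, by omega⟩
          have hcard' : (pvUnvis U (PySem.Set.add v nb)).card < g := by
            rw [pvUnvis_card_add U v nb hnbU hv]; omega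
          obtain ⟨k1, hk1⟩ := ihf g (by omega) nb (pvAdj graph nb) (PySem.Set.add v nb) c
            (fun x hx => hg nb x hx) hcard'
          have hdfs : pvDfsA graph component (g + 1) nb v c =
              pvLoopA graph component g nb (pvAdj graph nb) (PySem.Set.add v nb) c := by
            simp [pvDfsA]
          have hk1' : PvLoop graph component k1 nb (pvAdj graph nb) (PySem.Set.add v nb) c
              (pvDfsA graph component (g + 1) nb v c).1 (pvDfsA graph component (g + 1) nb v c).2 := by
            rw [hdfs]; exact hk1
          have hmono : ∀ x ∈ v, x ∈ (pvDfsA graph component (g + 1) nb v c).1 := by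
            intro x hx
            exact pvLoop_mono hk1' x ((PySem.Set.mem_add _ _ _).2 (Or.inl hx))
          have hcard2 : (pvUnvis U (pvDfsA graph component (g + 1) nb v c).1).card < g + 1 :=
            lt_of_le_of_lt (pvUnvis_card_mono U v _ hmono) hcard
          obtain ⟨k2, hk2⟩ := ihr (pvDfsA graph component (g + 1) nb v c).1
            (pvDfsA graph component (g + 1) nb v c).2
            (fun x hx => hn x (List.mem_cons_of_mem _ hx)) hcard2
          refine ⟨k1 + k2 + 1, ?_⟩
          have hvb : PySem.Set.contains v nb = false := by
            simp [PySem.Set.contains_eq_listContains]; simpa using hv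
          have heq : pvLoopA graph component (g + 1) n (nb :: r) v c =
              pvLoopA graph component (g + 1) n r
                (pvDfsA graph component (g + 1) nb v c).1 (pvDfsA graph component (g + 1) nb v c).2 := by
            simp [pvLoopA, hc, hv]
          rw [heq]
          exact PvLoop.step n hc hv hk1' hk2

-- step-count bound for a big step
theorem pvLoop_count {graph : List (Int × List Int)} {component : List Int} {U : Finset Int} {Q : Nat}
    (hg : ∀ m x, x ∈ pvAdj graph m → x ∈ U)
    (hQ : ∀ m, (pvAdj graph m).length + 2 ≤ Q)
    {k : Nat} {n : Int} {nbrs : List Int} {v : PySem.Set Int} {c : PySem.Dict Int Bool}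
    {v' : PySem.Set Int} {c' : PySem.Dict Int Bool}
    (h : PvLoop graph component k n nbrs v c v' c')
    (hn : ∀ x ∈ nbrs, x ∈ U) :
    k ≤ nbrs.length + 1 + ((pvUnvis U v).card - (pvUnvis U v').card) * Q := by
  induction h with
  | nil => simp
  | hit => simp
  | skip n h1 h2 hr ih =>
    have := ih (fun x hx => hn x (List.mem_cons_of_mem _ hx))
    simp only [List.length_cons]
    omega
  | @step k1 k2 nb r v c v1 c1 v' c'2 n h1 h2 hd hr ih1 ih2 =>
    have hnbU : nb ∈ U := hn nb List.mem_cons_self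
    have ihd := ih1 (fun x hx => hg nb x hx)
    have ihr' := ih2 (fun x hx => hn x (List.mem_cons_of_mem _ hx))
    have hQnb := hQ nb
    have hd2 : (pvUnvis U (PySem.Set.add v nb)).card = (pvUnvis U v).card - 1 :=
      pvUnvis_card_add U v nb hnbU h2
    have hdpos : 1 ≤ (pvUnvis U v).card :=
      Finset.card_pos.2 ⟨nb, pvUnvis_mem U v nb hnbU h2⟩
    have he1le : (pvUnvis U v1).card ≤ (pvUnvis U v).card - 1 := by
      rw [← hd2]
      exact pvUnvis_card_mono U _ _ (pvLoop_mono hd)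
    have he2le : (pvUnvis U v').card ≤ (pvUnvis U v1).card :=
      pvUnvis_card_mono U _ _ (pvLoop_mono hr)
    rw [hd2] at ihd
    set d := (pvUnvis U v).card
    set e1 := (pvUnvis U v1).card
    set e2 := (pvUnvis U v').card
    have key : d - e2 = (d - 1 - e1) + (e1 - e2) + 1 := by omega
    rw [key]
    have expand : ((d - 1 - e1) + (e1 - e2) + 1) * Q = (d - 1 - e1) * Q + (e1 - e2) * Q + Q := by ring
    rw [expand]
    simp only [List.length_cons]
    omega

-- the machine consumes exactly the counted number of iterations
theorem pvMachB_run {graph : List (Int × List Int)} {component : List Int}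
    {k : Nat} {n : Int} {nbrs : List Int} {v : PySem.Set Int} {c : PySem.Dict Int Bool}
    {v' : PySem.Set Int} {c' : PySem.Dict Int Bool}
    (h : PvLoop graph component k n nbrs v c v' c') :
    ∀ (f : Nat) (st : List (Int × List Int)), k ≤ f →
      pvMachB graph component f ((n, nbrs) :: st) v c = pvMachB graph component (f - k) st v' c' := by
  induction h with
  | nil n v c =>
    intro f st hf
    obtain ⟨g, rfl⟩ : ∃ g, f = g + 1 := ⟨f - 1, by omega⟩
    simp [pvMachB]
  | hit n r v c hcomp =>
    intro f st hf
    obtain ⟨g, rfl⟩ : ∃ g, f = g + 1 := ⟨f - 1, by omega⟩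
    simp [pvMachB, hcomp]
  | @skip k nb r v c v' c'2 n h1 h2 hr ih =>
    intro f st hf
    obtain ⟨g, rfl⟩ : ∃ g, f = g + 1 := ⟨f - 1, by omega⟩
    rw [show g + 1 - (k + 1) = g - k from by omega]
    rw [show pvMachB graph component (g + 1) ((n, nb :: r) :: st) v c =
        pvMachB graph component g ((n, r) :: st) v c from by simp [pvMachB, h1, h2]]
    exact ih g st (by omega)
  | @step k1 k2 nb r v c v1 c1 v' c'2 n h1 h2 hd hr ih1 ih2 =>
    intro f st hf
    obtain ⟨g, rfl⟩ : ∃ g, f = g + 1 := ⟨f - 1, by omega⟩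
    rw [show g + 1 - (k1 + k2 + 1) = g - k1 - k2 from by omega]
    rw [show pvMachB graph component (g + 1) ((n, nb :: r) :: st) v c =
        pvMachB graph component g ((nb, pvAdj graph nb) :: (n, r) :: st) (PySem.Set.add v nb) c from by
      simp [pvMachB, h1, h2]]
    rw [ih1 g ((n, r) :: st) (by omega), ih2 (g - k1) st (by omega)]

theorem pvMachB_nil (graph : List (Int × List Int)) (component : List Int)
    (f : Nat) (v : PySem.Set Int) (c : PySem.Dict Int Bool) :
    pvMachB graph component f [] v c = (v, c) := by
  cases f <;> simp [pvMachB]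

-- per start node: the recursive DFS and one machine run from that node agree
theorem pvStart (graph : List (Int × List Int)) (component : List Int) (U : Finset Int) (L D : Nat)
    (hg : ∀ m x, x ∈ pvAdj graph m → x ∈ U)
    (hD : ∀ m, (pvAdj graph m).length ≤ D)
    (hL : U.card ≤ L)
    (v : PySem.Set Int) (c : PySem.Dict Int Bool) (node : Int)
    (hnode : node ∈ U) (hv : ∀ x ∈ v, x ∈ U) (_hnv : node ∉ v) :
    pvDfsA graph component (L + 2) node v c =
      pvMachB graph component ((L + D + 2) * (L + D + 2))
        [(node, pvAdj graph node)] (PySem.Set.add v node) c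
    ∧ ∀ x ∈ (pvDfsA graph component (L + 2) node v c).1, x ∈ U := by
  rw [show L + 2 = (L + 1) + 1 from by omega]
  have hdfs : pvDfsA graph component ((L + 1) + 1) node v c =
      pvLoopA graph component (L + 1) node (pvAdj graph node) (PySem.Set.add v node) c := by
    simp [pvDfsA]
  have hn : ∀ x ∈ pvAdj graph node, x ∈ U := fun x hx => hg node x hx
  have hcard : (pvUnvis U (PySem.Set.add v node)).card < L + 1 :=
    lt_of_le_of_lt (le_trans (pvUnvis_card_le U _) hL) (by omega)
  obtain ⟨k, hk⟩ := pvLoopA_adequate hg (L + 1) node (pvAdj graph node) (PySem.Set.add v node) c hn hcard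
  have hQ : ∀ m, (pvAdj graph m).length + 2 ≤ D + 2 := fun m => by have := hD m; omega
  have hkb := pvLoop_count hg hQ hk hn
  have hkF : k ≤ (L + D + 2) * (L + D + 2) := by
    have h1 : (pvAdj graph node).length ≤ D := hD node
    have h2 : (pvUnvis U (PySem.Set.add v node)).card -
        (pvUnvis U (pvLoopA graph component (L + 1) node (pvAdj graph node) (PySem.Set.add v node) c).1).card ≤ L := by
      have := pvUnvis_card_le U (PySem.Set.add v node)
      omega
    have h3 : ((pvUnvis U (PySem.Set.add v node)).card -
        (pvUnvis U (pvLoopA graph component (L + 1) node (pvAdj graph node) (PySem.Set.add v node) c).1).card) * (D + 2)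
        ≤ L * (D + 2) := Nat.mul_le_mul_right _ h2
    nlinarith
  have hmach := pvMachB_run hk ((L + D + 2) * (L + D + 2)) [] hkF
  rw [pvMachB_nil] at hmach
  constructor
  · rw [hdfs, hmach]
  · intro x hx
    rw [hdfs] at hx
    rcases pvLoop_subU hg hk hn x hx with h | h
    · rcases (PySem.Set.mem_add _ _ _).1 h with h' | h'
      · exact hv x h'
      · exact h' ▸ hnode
    · exact h

-- one iteration of the per-component node loop: the two step functions agree and keep visited in U
theorem pvStepEq (graph : List (Int × List Int)) (component : List Int) (U : Finset Int) (L D : Nat)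
    (hg : ∀ m x, x ∈ pvAdj graph m → x ∈ U)
    (hD : ∀ m, (pvAdj graph m).length ≤ D)
    (hL : U.card ≤ L)
    (v : PySem.Set Int) (c : PySem.Dict Int Bool) (node : Int)
    (hnode : node ∈ U) (hv : ∀ x ∈ v, x ∈ U) :
    (if PySem.Dict.contains (if PySem.Set.contains v node then (v, c)
            else pvDfsA graph component (L + 2) node v c).2 node then
        (if PySem.Set.contains v node then (v, c) else pvDfsA graph component (L + 2) node v c)
      else ((if PySem.Set.contains v node then (v, c) else pvDfsA graph component (L + 2) node v c).1,
        PySem.Dict.insert (if PySem.Set.contains v node then (v, c)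
            else pvDfsA graph component (L + 2) node v c).2 node false)) =
    (if PySem.Dict.contains (if PySem.Set.contains v node then (v, c)
            else pvMachB graph component ((L + D + 2) * (L + D + 2))
              [(node, pvAdj graph node)] (PySem.Set.add v node) c).2 node then
        (if PySem.Set.contains v node then (v, c)
          else pvMachB graph component ((L + D + 2) * (L + D + 2))
            [(node, pvAdj graph node)] (PySem.Set.add v node) c)
      else ((if PySem.Set.contains v node then (v, c)
          else pvMachB graph component ((L + D + 2) * (L + D + 2))
            [(node, pvAdj graph node)] (PySem.Set.add v node) c).1,
        PySem.Dict.insert (if PySem.Set.contains v node then (v, c)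
            else pvMachB graph component ((L + D + 2) * (L + D + 2))
              [(node, pvAdj graph node)] (PySem.Set.add v node) c).2 node false))
    ∧ ∀ x ∈ (if PySem.Dict.contains (if PySem.Set.contains v node then (v, c)
            else pvDfsA graph component (L + 2) node v c).2 node then
        (if PySem.Set.contains v node then (v, c) else pvDfsA graph component (L + 2) node v c)
      else ((if PySem.Set.contains v node then (v, c) else pvDfsA graph component (L + 2) node v c).1,
        PySem.Dict.insert (if PySem.Set.contains v node then (v, c)
            else pvDfsA graph component (L + 2) node v c).2 node false)).1, x ∈ U := by
  by_cases hmem : node ∈ v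
  · constructor
    · simp [hmem]
    · intro x hx
      simp only [apply_ite Prod.fst] at hx
      simp [hmem, ite_self] at hx
      exact hv x hx
  · obtain ⟨he, hU⟩ := pvStart graph component U L D hg hD hL v c node hnode hv hmem
    constructor
    · simp [hmem, he]
    · intro x hx
      simp only [apply_ite Prod.fst] at hx
      simp [hmem, ite_self] at hx
      exact hU x hx

-- the per-component node loop of the two ports agrees and keeps visited inside U
theorem pvFold (graph : List (Int × List Int)) (component : List Int) (U : Finset Int) (L D : Nat)
    (hg : ∀ m x, x ∈ pvAdj graph m → x ∈ U)
    (hD : ∀ m, (pvAdj graph m).length ≤ D)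
    (hL : U.card ≤ L) :
    ∀ (nodes : List Int) (st : PySem.Set Int × PySem.Dict Int Bool),
      (∀ x ∈ nodes, x ∈ U) → (∀ x ∈ st.1, x ∈ U) →
      nodes.foldl
        (fun (st : PySem.Set Int × PySem.Dict Int Bool) node =>
          let st := if PySem.Set.contains st.1 node then st
                    else pvDfsA graph component (L + 2) node st.1 st.2
          if PySem.Dict.contains st.2 node then st
          else (st.1, PySem.Dict.insert st.2 node false)) st =
      nodes.foldl
        (fun (st : PySem.Set Int × PySem.Dict Int Bool) node =>
          let st := if PySem.Set.contains st.1 node then st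
                    else pvMachB graph component ((L + D + 2) * (L + D + 2))
                      [(node, pvAdj graph node)] (PySem.Set.add st.1 node) st.2
          if PySem.Dict.contains st.2 node then st
          else (st.1, PySem.Dict.insert st.2 node false)) st := by
  intro nodes
  induction nodes with
  | nil => exact fun st _ _ => rfl
  | cons node rest ih =>
    intro st hn hv
    simp only [List.foldl_cons]
    obtain ⟨he, hU⟩ := pvStepEq graph component U L D hg hD hL st.1 st.2 node
      (hn node List.mem_cons_self) hv
    simp only [Prod.mk.eta] at he hU
    rw [← he]
    exact ih _ (fun x hx => hn x (List.mem_cons_of_mem _ hx)) hU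

-- the component loop of the two ports agrees
theorem pvComps (graph : List (Int × List Int)) (U : Finset Int) (L D : Nat)
    (hg : ∀ m x, x ∈ pvAdj graph m → x ∈ U)
    (hD : ∀ m, (pvAdj graph m).length ≤ D)
    (hL : U.card ≤ L) :
    ∀ (comps : List (List Int)) (calls : PySem.Dict Int Bool),
      (∀ comp ∈ comps, ∀ x ∈ comp, x ∈ U) →
      comps.foldl
        (fun (calls : PySem.Dict Int Bool) component =>
          (component.foldl
            (fun (st : PySem.Set Int × PySem.Dict Int Bool) node =>
              let st := if PySem.Set.contains st.1 node then st
                        else pvDfsA graph component (L + 2) node st.1 st.2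
              if PySem.Dict.contains st.2 node then st
              else (st.1, PySem.Dict.insert st.2 node false))
            (PySem.Set.empty, calls)).2) calls =
      comps.foldl
        (fun (calls : PySem.Dict Int Bool) component =>
          (component.foldl
            (fun (st : PySem.Set Int × PySem.Dict Int Bool) node =>
              let st := if PySem.Set.contains st.1 node then st
                        else pvMachB graph component ((L + D + 2) * (L + D + 2))
                          [(node, pvAdj graph node)] (PySem.Set.add st.1 node) st.2
              if PySem.Dict.contains st.2 node then st
              else (st.1, PySem.Dict.insert st.2 node false))
            (PySem.Set.empty, calls)).2) calls := by
  intro comps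
  induction comps with
  | nil => exact fun calls _ => rfl
  | cons comp rest ih =>
    intro calls hc
    simp only [List.foldl_cons]
    rw [pvFold graph comp U L D hg hD hL comp (PySem.Set.empty, calls)
      (hc comp List.mem_cons_self) (by intro x hx; cases hx)]
    exact ih _ (fun c' hc' => hc c' (List.mem_cons_of_mem _ hc'))

-- ===== VERDICT (by name: the statement is the Claim_ definition above) =====
set_option maxHeartbeats 2000000 in
theorem check_recursive_calls_spec : Claim_equal_check_recursive_calls := by
  intro components graph _
  have hg : ∀ m x, x ∈ pvAdj graph m → x ∈ (pvAllNodes components graph).toFinset := by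
    intro m x hx
    rw [List.mem_toFinset]
    unfold pvAllNodes
    simp only [List.mem_append]
    exact Or.inl (Or.inr (pvAdj_sub graph m x hx))
  have hD : ∀ m, (pvAdj graph m).length ≤ ((graph.map (·.2)).flatten).length := pvAdj_len graph
  have hL : ((pvAllNodes components graph).toFinset).card ≤ (pvAllNodes components graph).length :=
    List.toFinset_card_le _
  have hc : ∀ comp ∈ components, ∀ x ∈ comp, x ∈ (pvAllNodes components graph).toFinset := by
    intro comp hcomp x hx
    rw [List.mem_toFinset]
    unfold pvAllNodes
    simp only [List.mem_append, List.mem_flatten]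
    exact Or.inr ⟨comp, hcomp, hx⟩
  have key := pvComps graph (pvAllNodes components graph).toFinset
    (pvAllNodes components graph).length ((graph.map (·.2)).flatten).length
    hg hD hL components PySem.Dict.empty hc
  show check_recursive_calls components graph = check_recursive_calls_alt components graph
  unfold check_recursive_calls check_recursive_calls_alt
  exact congrArg PySem.Dict.items key
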